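-- pv_equiv track=rewrite | github.com/marinaEM/inverex-mvp-molec | src/features/drug_target_interactions.py | find_pathways_for_targets
-- ===== SOURCE A (Python) =====
-- def find_pathways_for_targets(
--     targets: list[str],
--     hallmark: dict[str, set[str]],
-- ) -> list[str]:
--     """
--     Return Hallmark pathway names that contain at least one of the targets.
--     """
--     target_set = set(targets)
--     return sorted(
--         pw for pw, genes in hallmark.items() if target_set & genes
--     )
-- ===== SOURCE B (Python) =====
-- def find_pathways_for_targets(
--     targets: list[str],
--     hallmark: dict[str, set[str]],
-- ) -> list[str]:
--     """
--     Return Hallmark pathway names that contain at least one of the targets.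
--
--     Builds a reverse gene -> pathways index once, then looks up each target.
--     """
--     index: dict[str, list[str]] = {}
--     for pw, genes in hallmark.items():
--         for g in genes:
--             index.setdefault(g, []).append(pw)
--     found: set[str] = set()
--     for t in set(targets):
--         found.update(index.get(t, ()))
--     return sorted(found)
-- ===== Notes on version B (the rewrite author's own statement) =====
-- stated objective: alternative
-- what changed: Instead of intersecting each pathway's gene set with the target set, B builds a reverse gene-to-pathways index once and collects the pathways hit by each target, deduplicating with a result set before sorting.
import Mathlib
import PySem

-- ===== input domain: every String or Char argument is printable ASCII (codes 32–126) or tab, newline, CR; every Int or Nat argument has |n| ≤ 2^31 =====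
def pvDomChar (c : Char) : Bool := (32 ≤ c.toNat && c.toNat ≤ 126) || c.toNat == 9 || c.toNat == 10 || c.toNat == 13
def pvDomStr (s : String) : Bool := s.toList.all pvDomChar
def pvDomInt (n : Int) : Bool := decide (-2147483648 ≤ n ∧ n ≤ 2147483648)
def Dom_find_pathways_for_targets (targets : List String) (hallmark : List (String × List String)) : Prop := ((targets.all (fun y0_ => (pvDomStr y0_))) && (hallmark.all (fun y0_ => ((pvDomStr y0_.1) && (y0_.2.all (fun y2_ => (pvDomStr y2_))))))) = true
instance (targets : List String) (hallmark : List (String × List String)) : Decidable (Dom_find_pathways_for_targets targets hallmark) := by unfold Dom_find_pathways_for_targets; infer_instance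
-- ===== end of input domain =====

-- B replaces the per-pathway set intersection by a reverse gene->pathways index queried per target (alternative decomposition, same result).
-- ===== PORT A =====
def find_pathways_for_targets (targets : List String) (hallmark : List (String × List String)) : List String :=
  let target_set : PySem.Set String := PySem.Set.ofList targets
  PySem.List.sorted
    ((hallmark.filter (fun pg => !(PySem.Set.inter target_set pg.2).isEmpty)).map (fun pg => pg.1))
    (fun x => x) false

-- ===== PORT B =====
def find_pathways_for_targets_alt (targets : List String) (hallmark : List (String × List String)) : List String :=
  let index : PySem.Dict String (List String) :=
    hallmark.foldl
      (fun d pg => pg.2.foldl (fun d g => d.modify g [] (fun l => l ++ [pg.1])) d)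
      PySem.Dict.empty
  let found : PySem.Set String :=
    (PySem.Set.ofList targets).foldl
      (fun s t => PySem.Set.update s (index.getD t [])) PySem.Set.empty
  PySem.List.sorted found (fun x => x) false

-- ===== PRECONDITION & SPEC =====
-- Pre_ excludes only association lists with duplicate pathway keys, which do not represent any
-- Python dict (a dict cannot hold the same key twice); A's input 'hallmark' is a dict.
def Pre_find_pathways_for_targets (targets : List String) (hallmark : List (String × List String)) : Prop :=
  (hallmark.map (fun pg => pg.1)).Nodup
instance (targets : List String) (hallmark : List (String × List String)) : Decidable (Pre_find_pathways_for_targets targets hallmark) := by unfold Pre_find_pathways_for_targets; infer_instance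
def pvWitness_find_pathways_for_targets : List String × (List (String × List String)) :=
  (["TP53"], [("P1", ["TP53", "EGFR"]), ("P2", ["KRAS"])])
def Spec_find_pathways_for_targets (targets : List String) (hallmark : List (String × List String)) (out : List String) : Prop := out = find_pathways_for_targets_alt targets hallmark
instance (targets : List String) (hallmark : List (String × List String)) (out : List String) : Decidable (Spec_find_pathways_for_targets targets hallmark out) := by unfold Spec_find_pathways_for_targets; infer_instance

-- ===== CLAIM (what is proved, stated in full; the proofs are below) =====
def Claim_equal_find_pathways_for_targets : Prop := ∀ (targets : List String) (hallmark : List (String × List String)), Dom_find_pathways_for_targets targets hallmark → Pre_find_pathways_for_targets targets hallmark → Spec_find_pathways_for_targets targets hallmark (find_pathways_for_targets targets hallmark)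

-- ===== LEMMAS AND PROOFS =====

-- inner index loop: appending pw under every gene of one pathway
theorem mem_getD_inner (genes : List String) (pw : String) (d : PySem.Dict String (List String)) (g x : String) :
    x ∈ (genes.foldl (fun d g => d.modify g [] (fun l => l ++ [pw])) d).getD g [] ↔
      x ∈ d.getD g [] ∨ (x = pw ∧ g ∈ genes) := by
  induction genes generalizing d with
  | nil => simp
  | cons a t ih =>
    simp only [List.foldl_cons, ih, PySem.Dict.getD_modify, List.mem_cons]
    by_cases h : g = a
    · subst h
      simp only [if_true, List.mem_append, List.mem_singleton, true_or, and_true]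
      tauto
    · simp only [if_neg h, h, false_or]
      tauto

-- the whole index: x is listed under g iff some pathway named x contains gene g
theorem mem_getD_index (hallmark : List (String × List String)) (d : PySem.Dict String (List String)) (g x : String) :
    x ∈ (hallmark.foldl (fun d pg => pg.2.foldl (fun d g => d.modify g [] (fun l => l ++ [pg.1])) d) d).getD g [] ↔
      x ∈ d.getD g [] ∨ ∃ p ∈ hallmark, p.1 = x ∧ g ∈ p.2 := by
  induction hallmark generalizing d with
  | nil => simp
  | cons a t ih =>
    simp only [List.foldl_cons, ih, mem_getD_inner, List.mem_cons]
    constructor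
    · rintro (((h | ⟨rfl, hg⟩) | ⟨p, hp, rfl, hg⟩))
      · exact Or.inl h
      · exact Or.inr ⟨a, Or.inl rfl, rfl, hg⟩
      · exact Or.inr ⟨p, Or.inr hp, rfl, hg⟩
    · rintro (h | ⟨p, (rfl | hp), rfl, hg⟩)
      · exact Or.inl (Or.inl h)
      · exact Or.inl (Or.inr ⟨rfl, hg⟩)
      · exact Or.inr ⟨p, hp, rfl, hg⟩

-- collecting loop: membership in the accumulated result set
theorem mem_found_loop (l : List String) (f : String → List String) (s : PySem.Set String) (x : String) :
    x ∈ l.foldl (fun s t => PySem.Set.update s (f t)) s ↔ x ∈ s ∨ ∃ t ∈ l, x ∈ f t := by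
  induction l generalizing s with
  | nil => simp
  | cons a t ih =>
    simp only [List.foldl_cons, ih, PySem.Set.mem_update, List.mem_cons]
    aesop

theorem nodup_found_loop (l : List String) (f : String → List String) (s : PySem.Set String)
    (hs : s.Nodup) : (l.foldl (fun s t => PySem.Set.update s (f t)) s).Nodup := by
  induction l generalizing s with
  | nil => exact hs
  | cons a t ih => exact ih _ (PySem.Set.nodup_update _ _ hs)

-- ===== VERDICT (by name: the statement is the Claim_ definition above) =====
theorem find_pathways_for_targets_spec : Claim_equal_find_pathways_for_targets := by
  intro targets hallmark _ hpre
  unfold Spec_find_pathways_for_targets find_pathways_for_targets find_pathways_for_targets_alt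
  apply PySem.List.sorted_eq_sorted_of_perm _ _ _ (fun a b h => h)
  rw [List.perm_ext_iff_of_nodup]
  · intro x
    rw [mem_found_loop]
    simp only [List.mem_map, List.mem_filter, mem_getD_index, PySem.Dict.getD_empty,
      PySem.Set.empty, List.not_mem_nil, false_or, PySem.Set.mem_ofList, Bool.not_eq_eq_eq_not,
      Bool.not_true, List.isEmpty_eq_false_iff_exists_mem, PySem.Set.mem_inter]
    constructor
    · rintro ⟨pg, ⟨hpg, g, hg1, hg2⟩, rfl⟩
      exact ⟨g, hg1, pg, hpg, rfl, hg2⟩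
    · rintro ⟨t, ht, p, hp, rfl, hg⟩
      exact ⟨p, ⟨hp, t, ht, hg⟩, rfl⟩
  · exact ((List.filter_sublist (l := hallmark)).map (fun pg : String × List String => pg.1)).nodup hpre
  · exact nodup_found_loop _ _ _ List.nodup_nil
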